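-- pv_equiv track=rewrite | github.com/cwahn/athena | src/athena/prelude.py | intercalate
-- ===== SOURCE A (Python) =====
-- from typing import Tuple, TypeVar, Iterable, Callable, Optional, Iterator
--
-- _A = TypeVar("_A")
--
-- def intercalate(sep: Iterable[_A], xss: Iterable[Iterable[_A]]) -> Iterator[_A]:
--     it = iter(xss)
--     try:
--         yield from next(it)
--         for xs in it:
--             yield from sep
--             yield from xs
--     except StopIteration:
--         return
-- ===== SOURCE B (Python) =====
-- from typing import TypeVar, Iterable, Iterator
--
-- _A = TypeVar("_A")
--
-- def intercalate(sep: Iterable[_A], xss: Iterable[Iterable[_A]]) -> Iterator[_A]: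
--     sep_list = list(sep)
--     pieces = [p for xs in xss for p in (sep_list, list(xs))][1:]
--     for piece in pieces:
--         yield from piece
-- ===== Notes on version B (the rewrite author's own statement) =====
-- stated objective: alternative
-- what changed: Replaces A's streaming peel-first generator (next()/try-except, sep yielded before each later block) with a staged construction: pair every block with a preceding sep piece in one flat comprehension, drop the spurious leading sep piece, then flatten the piece list.
import Mathlib
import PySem

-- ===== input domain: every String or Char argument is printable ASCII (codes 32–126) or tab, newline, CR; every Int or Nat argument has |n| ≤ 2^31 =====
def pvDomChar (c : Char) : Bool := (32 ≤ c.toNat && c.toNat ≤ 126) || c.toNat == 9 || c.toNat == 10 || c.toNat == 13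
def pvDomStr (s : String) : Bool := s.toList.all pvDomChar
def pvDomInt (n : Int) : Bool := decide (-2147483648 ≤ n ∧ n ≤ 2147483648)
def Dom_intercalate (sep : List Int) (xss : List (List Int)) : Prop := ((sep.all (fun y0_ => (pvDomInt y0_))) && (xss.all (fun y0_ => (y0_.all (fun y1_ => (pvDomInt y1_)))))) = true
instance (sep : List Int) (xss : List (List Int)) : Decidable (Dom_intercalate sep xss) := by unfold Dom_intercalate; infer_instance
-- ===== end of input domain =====

-- B replaces A's streaming peel-first generator with a staged build: prepend sep to every block,
-- drop the spurious leading sep piece, flatten (alternative decomposition, same cost).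

-- ===== PORT A =====
-- A: pull the first sub-iterable with next() (empty xss → StopIteration → yield nothing),
-- then loop over the remaining iterables, yielding sep before each.
def intercalate (sep : List Int) (xss : List (List Int)) : List Int :=
  match xss with
  | [] => []
  | x :: rest => rest.foldl (fun acc xs => acc ++ sep ++ xs) x

-- ===== PORT B =====
-- B: pieces = [p for xs in xss for p in (sep, xs)][1:]; then flatten the pieces.
def intercalate_alt (sep : List Int) (xss : List (List Int)) : List Int :=
  ((xss.flatMap (fun xs => [sep, xs])).drop 1).flatten

-- ===== PRECONDITION & SPEC =====
def Spec_intercalate (sep : List Int) (xss : List (List Int)) (out : List Int) : Prop := out = intercalate_alt sep xss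
instance (sep : List Int) (xss : List (List Int)) (out : List Int) : Decidable (Spec_intercalate sep xss out) := by unfold Spec_intercalate; infer_instance

-- ===== CLAIM (what is proved, stated in full; the proofs are below) =====
def Claim_equal_intercalate : Prop := ∀ (sep : List Int) (xss : List (List Int)), Dom_intercalate sep xss → Spec_intercalate sep xss (intercalate sep xss)

-- ===== LEMMAS AND PROOFS =====
-- A's fold over the tail, started from any accumulator, equals the flattened [sep, xs] pieces
-- of the tail appended to the accumulator.
theorem intercalate_foldl_eq_flatten (sep : List Int) :
    ∀ (rest : List (List Int)) (acc : List Int),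
      rest.foldl (fun acc xs => acc ++ sep ++ xs) acc
        = acc ++ (rest.flatMap (fun xs => [sep, xs])).flatten := by
  intro rest
  induction rest with
  | nil => intro acc; simp
  | cons y ys ih =>
      intro acc
      simp only [List.foldl, ih]
      simp [List.append_assoc]

-- ===== VERDICT (by name: the statement is the Claim_ definition above) =====
theorem intercalate_spec : Claim_equal_intercalate := by
  intro sep xss _
  unfold Spec_intercalate intercalate intercalate_alt
  cases xss with
  | nil => rfl
  | cons x rest =>
      simp only [List.flatMap_cons, List.cons_append, List.drop_succ_cons, List.drop_zero,
        List.nil_append, List.flatten_cons]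
      exact intercalate_foldl_eq_flatten sep rest x
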